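-- pv_equiv track=rewrite | github.com/Nolelle/RAGChat | src/firstresponders_chatbot/preprocessing/preprocessor.py | _is_quality_content
-- ===== SOURCE A (Python) =====
-- def _is_quality_content(content: str) -> bool:
--     """
--     Check if content is of sufficient quality for training.
--     Optimized for Llama 2 training.
--
--     Args:
--         content: The document content to check
--
--     Returns:
--         True if content is high quality, False otherwise
--     """
--     # Skip content that's too short
--     if len(content.strip()) < 100:
--         return False
--
--     # Skip content that's mostly numbers or special characters
--     alphanumeric_ratio = (
--         sum(c.isalnum() for c in content) / len(content) if content else 0
--     )
--     if alphanumeric_ratio < 0.5: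
--         return False
--
--     # Skip content with too many newlines (likely tables or formatting issues)
--     newline_ratio = content.count("\n") / len(content) if content else 0
--     if newline_ratio > 0.2:
--         return False
--
--     # Llama 2 specific: Check for sufficient sentence structure
--     # This helps ensure the content is actual text and not just fragments
--     sentences = content.split(".")
--     if len(sentences) < 2:
--         return False
--
--     # Check for at least some meaningful words
--     word_count = len(content.split())
--     if word_count < 20:
--         return False
--
--     return True
-- ===== SOURCE B (Python) =====
-- def _is_quality_content(content: str) -> bool:
--     # One pass over content maintaining counters instead of five separate scans.
--     alnum = nl = period = words = 0
--     in_word = False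
--     for c in content:
--         if c.isalnum():
--             alnum += 1
--         if c == "\n":
--             nl += 1
--         if c == ".":
--             period += 1
--         if c.isspace():
--             in_word = False
--         else:
--             if not in_word:
--                 words += 1
--             in_word = True
--     if len(content.strip()) < 100:
--         return False
--     if (alnum / len(content) if content else 0) < 0.5:
--         return False
--     if (nl / len(content) if content else 0) > 0.2:
--         return False
--     if period == 0:
--         return False
--     if words < 20:
--         return False
--     return True
-- ===== Notes on version B (the rewrite author's own statement) =====
-- stated objective: alternative
-- what changed: A scans the string five times (strip, per-char alnum sum, newline count, period split, whitespace split); B makes a single pass maintaining integer counters (alnum, newline, period, and word count via an in-word flag) and applies the same five checks to them.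
import Mathlib
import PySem

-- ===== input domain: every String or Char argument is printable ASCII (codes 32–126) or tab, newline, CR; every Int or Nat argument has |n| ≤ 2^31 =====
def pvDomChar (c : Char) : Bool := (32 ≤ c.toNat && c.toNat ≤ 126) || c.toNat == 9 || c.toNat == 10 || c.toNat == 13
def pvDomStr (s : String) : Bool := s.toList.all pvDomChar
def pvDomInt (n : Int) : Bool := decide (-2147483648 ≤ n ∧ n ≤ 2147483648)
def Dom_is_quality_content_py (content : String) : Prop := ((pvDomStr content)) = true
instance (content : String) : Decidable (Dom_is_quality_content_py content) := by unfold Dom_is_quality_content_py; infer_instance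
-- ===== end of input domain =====

-- B replaces A's five separate scans of the string (sum, count, two splits) by a single
-- pass maintaining integer counters; same return value everywhere (objective: alternative).

-- ===== PORT A =====
-- Python's float comparisons sum/len < 0.5 and count/len > 0.2 are ported exactly as the
-- integer comparisons 2*sum < len and 5*count > len (exact: both sides are exact rationals
-- with denominator len ≤ 2^31, far below double rounding error near 0.5/0.2).
def is_quality_content_py (content : String) : Bool :=
  if PySem.Str.len (PySem.Str.strip content) < 100 then false
  else
    let cs := content.toList
    let alnum : Int := (cs.map (fun c => if PySem.Chars.isalnum c then (1 : Int) else 0)).sum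
    if (if cs.isEmpty then true else decide (2 * alnum < (cs.length : Int))) then false
    else if (if cs.isEmpty then false else decide (5 * (PySem.Str.count content "\n" : Int) > (cs.length : Int))) then false
    else if (PySem.Chars.splitOn cs ['.']).length < 2 then false
    else if (PySem.Str.split₀ content).length < 20 then false
    else true

-- ===== PORT B =====
-- counters (alnum, newline, period, words, in_word), one fold over the characters
def is_quality_content_py_alt (content : String) : Bool :=
  let st := content.toList.foldl
    (fun (s : Int × Int × Int × Int × Bool) c =>
      let al := if PySem.Chars.isalnum c then s.1 + 1 else s.1
      let nl := if c == '\n' then s.2.1 + 1 else s.2.1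
      let pd := if c == '.' then s.2.2.1 + 1 else s.2.2.1
      if PySem.Chars.isspace c then (al, nl, pd, s.2.2.2.1, false)
      else (al, nl, pd, (if s.2.2.2.2 then s.2.2.2.1 else s.2.2.2.1 + 1), true))
    (0, 0, 0, 0, false)
  if PySem.Str.len (PySem.Str.strip content) < 100 then false
  else if (if content.toList.isEmpty then true else decide (2 * st.1 < (content.toList.length : Int))) then false
  else if (if content.toList.isEmpty then false else decide (5 * st.2.1 > (content.toList.length : Int))) then false
  else if st.2.2.1 == 0 then false
  else if st.2.2.2.1 < 20 then false
  else true

-- ===== PRECONDITION & SPEC =====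
def Spec_is_quality_content_py (content : String) (out : Bool) : Prop := out = is_quality_content_py_alt content
instance (content : String) (out : Bool) : Decidable (Spec_is_quality_content_py content out) := by unfold Spec_is_quality_content_py; infer_instance

-- ===== CLAIM (what is proved, stated in full; the proofs are below) =====
def Claim_equal_is_quality_content_py : Prop := ∀ (content : String), Dom_is_quality_content_py content → Spec_is_quality_content_py content (is_quality_content_py content)

-- ===== LEMMAS AND PROOFS =====

-- word count spec: number of whitespace→non-whitespace transitions, iw = currently inside a word
def pvWcount (l : List Char) (iw : Bool) : Nat :=
  match l with
  | [] => 0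
  | c :: cs =>
    if PySem.Chars.isspace c then pvWcount cs false
    else (if iw then 0 else 1) + pvWcount cs true

-- single-char substring count is List.count
theorem pv_count_go_single (x : Char) :
    ∀ (l : List Char) (fuel acc : Nat), l.length ≤ fuel →
      PySem.Chars.count.go [x] fuel l acc = acc + l.count x := by
  intro l
  induction l with
  | nil => intro fuel acc _; cases fuel <;> simp [PySem.Chars.count.go]
  | cons c t ih =>
    intro fuel acc h
    cases fuel with
    | zero => simp at h
    | succ f =>
      simp only [List.length_cons, Nat.succ_le_succ_iff] at h
      by_cases hc : c = x
      · subst hc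
        have hp : List.isPrefixOf [c] (c :: t) = true := by simp [List.isPrefixOf]
        simp only [PySem.Chars.count.go, hp, if_pos, List.length_singleton,
          List.drop_succ_cons, List.drop_zero]
        rw [ih f (acc + 1) h]
        simp [List.count_cons]
        omega
      · have hp : List.isPrefixOf [x] (c :: t) = false := by
          simp [List.isPrefixOf]
          exact fun hcx => absurd hcx.symm hc
        simp only [PySem.Chars.count.go, hp, Bool.false_eq_true, if_false]
        rw [ih f acc h]
        simp [hc]

theorem pv_count_single (x : Char) (l : List Char) :
    PySem.Chars.count l [x] = l.count x := by
  simp only [PySem.Chars.count, List.isEmpty, reduceCtorEq, if_false]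
  simpa using pv_count_go_single x l l.length 0 le_rfl

-- splitOn a single-char separator yields count+1 pieces
theorem pv_splitOn_go_single (x : Char) :
    ∀ (l : List Char) (fuel : Nat) (cur : List Char) (acc : List (List Char)),
      l.length ≤ fuel →
      (PySem.Chars.splitOn.go [x] fuel l cur acc).length = acc.length + 1 + l.count x := by
  intro l
  induction l with
  | nil => intro fuel cur acc _; cases fuel <;> simp [PySem.Chars.splitOn.go]
  | cons c t ih =>
    intro fuel cur acc h
    cases fuel with
    | zero => simp at h
    | succ f =>
      simp only [List.length_cons, Nat.succ_le_succ_iff] at h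
      by_cases hc : c = x
      · subst hc
        have hp : List.isPrefixOf [c] (c :: t) = true := by simp [List.isPrefixOf]
        simp only [PySem.Chars.splitOn.go, hp, if_pos, List.length_singleton,
          List.drop_succ_cons, List.drop_zero]
        rw [ih f [] (cur.reverse :: acc) h]
        simp [List.count_cons]
        omega
      · have hp : List.isPrefixOf [x] (c :: t) = false := by
          simp [List.isPrefixOf]
          exact fun hcx => absurd hcx.symm hc
        simp only [PySem.Chars.splitOn.go, hp, Bool.false_eq_true, if_false]
        rw [ih f (c :: cur) acc h]
        simp [List.count_cons, hc]

theorem pv_splitOn_single (x : Char) (l : List Char) :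
    (PySem.Chars.splitOn l [x]).length = 1 + l.count x := by
  simpa using pv_splitOn_go_single x l (l.length + 1) [] [] (Nat.le_succ _)

-- split₀ yields exactly the whitespace→non-whitespace transitions many words
theorem pv_split₀_go (l : List Char) :
    ∀ (cur : List Char) (acc : List (List Char)),
      (PySem.Chars.split₀.go l cur acc).length
        = acc.length + (if cur.isEmpty then 0 else 1) + pvWcount l (!cur.isEmpty) := by
  induction l with
  | nil =>
    intro cur acc
    cases cur <;> simp [PySem.Chars.split₀.go, pvWcount]
  | cons c t ih =>
    intro cur acc
    by_cases hs : PySem.Chars.isspace c = true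
    · cases cur with
      | nil =>
        simp only [PySem.Chars.split₀.go, hs, if_pos, List.isEmpty_nil]
        rw [ih [] acc]
        simp [pvWcount, hs]
      | cons a b =>
        simp only [PySem.Chars.split₀.go, hs, if_pos, List.isEmpty_cons,
          Bool.false_eq_true, if_false]
        rw [ih [] ((a :: b).reverse :: acc)]
        simp [pvWcount, hs]
        try omega
    · simp only [PySem.Chars.split₀.go, hs, Bool.false_eq_true, if_false]
      rw [ih (c :: cur) acc]
      cases cur <;> simp [pvWcount, hs] <;> try omega

theorem pv_split₀_length (l : List Char) :
    (PySem.Chars.split₀ l).length = pvWcount l false := by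
  simpa using pv_split₀_go l [] []

-- the one-pass fold computes the four counters
theorem pv_fold_spec (l : List Char) :
    ∀ (al nl pd wd : Int) (iw : Bool),
      l.foldl
        (fun (s : Int × Int × Int × Int × Bool) c =>
          let al := if PySem.Chars.isalnum c then s.1 + 1 else s.1
          let nl := if c == '\n' then s.2.1 + 1 else s.2.1
          let pd := if c == '.' then s.2.2.1 + 1 else s.2.2.1
          if PySem.Chars.isspace c then (al, nl, pd, s.2.2.2.1, false)
          else (al, nl, pd, (if s.2.2.2.2 then s.2.2.2.1 else s.2.2.2.1 + 1), true))
        (al, nl, pd, wd, iw)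
        = (al + l.countP PySem.Chars.isalnum, nl + l.count '\n', pd + l.count '.',
           wd + pvWcount l iw, l.foldl (fun _ c => !PySem.Chars.isspace c) iw) := by
  induction l with
  | nil => intro al nl pd wd iw; simp [pvWcount]
  | cons c t ih =>
    intro al nl pd wd iw
    simp only [List.foldl_cons]
    by_cases hs : PySem.Chars.isspace c = true
    · simp only [hs, if_pos]
      rw [ih]
      simp only [Prod.mk.injEq]
      refine ⟨?_, ?_, ?_, ?_, ?_⟩ <;>
        simp [pvWcount, hs, List.count_cons, List.countP_cons] <;>
        split_ifs <;> push_cast <;> ring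
    · simp only [hs, Bool.false_eq_true, if_false]
      rw [ih]
      simp only [Prod.mk.injEq]
      refine ⟨?_, ?_, ?_, ?_, ?_⟩ <;>
        simp [pvWcount, hs, List.count_cons, List.countP_cons] <;>
        split_ifs <;> push_cast <;> ring

-- ===== VERDICT (by name: the statement is the Claim_ definition above) =====
theorem is_quality_content_py_spec : Claim_equal_is_quality_content_py := by
  intro content _
  unfold Spec_is_quality_content_py is_quality_content_py is_quality_content_py_alt
  rw [pv_fold_spec]
  have hnl : ("\n" : String).toList = ['\n'] := rfl
  have hdot : ("." : String).toList = ['.'] := rfl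
  simp only [PySem.List.sum_map_ite_one_zero, PySem.Str.count_eq, hnl, pv_count_single,
    pv_splitOn_single, pv_split₀_length, PySem.Str.split₀, List.length_map, zero_add]
  generalize List.count '.' content.toList = k
  generalize pvWcount content.toList false = w
  split_ifs <;> simp_all <;> omega
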